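-- pv_equiv track=rewrite | github.com/nier2kirito/Spin_and_Go_Solver | canonical_representations.py | suit_arrangement
-- ===== SOURCE A (Python) =====
-- import itertools
--
-- suits = ['c', 'd', 'h', 's']
--
-- def is_isomorphic(suit_arrangement1, suit_arrangement2, rank_pattern):
--     # If lengths don't match, they can't be isomorphic
--     if len(suit_arrangement1) != len(suit_arrangement2):
--         return False
--
--     # Create a "signature" for each arrangement based on where each suit appears
--     signature1 = {}
--     signature2 = {}
--
--     pos = 0
--     for group_idx, group_size in enumerate(rank_pattern):
--         for i in range(group_size):
--             suit1 = suit_arrangement1[pos + i]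
--             suit2 = suit_arrangement2[pos + i]
--
--             if suit1 not in signature1:
--                 signature1[suit1] = []
--             if suit2 not in signature2:
--                 signature2[suit2] = []
--
--             signature1[suit1].append(group_idx)
--             signature2[suit2].append(group_idx)
--
--         pos += group_size
--
--     # Sort the signatures by their patterns
--     pattern1 = sorted(signature1.values())
--     pattern2 = sorted(signature2.values())
--     # If the patterns match, the arrangements are isomorphic
--     return pattern1 == pattern2
--
-- def suit_arrangement(partition):
--     suits_combinations = []
--     for index in range(len(partition)):
--         count = partition[index]
--         if index == 0:
--             for combination in itertools.permutations(suits, count):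
--                 suits_combinations.append(tuple(sorted(combination)))
--         else:
--             new_combinations = []
--             for suit_combination in suits_combinations:
--                 for combination in itertools.permutations(suits, count):
--                     new_suit_combination = suit_combination + tuple(sorted(combination))
--                     new_combinations.append(new_suit_combination)
--             suits_combinations = new_combinations
--     results = sorted(list(set(suits_combinations)))
--
--     # Filter out isomorphic arrangements
--     unique_arrangements = []
--     for result in results:
--         is_unique = True
--         for unique in unique_arrangements:
--             if is_isomorphic(result, unique, partition):
--                 is_unique = False
--                 break
--         if is_unique:
--             unique_arrangements.append(result)
--
--     return unique_arrangements
-- ===== SOURCE B (Python) =====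
-- import itertools
--
-- suits = ['c', 'd', 'h', 's']
--
-- def _sig_key(arr, partition):
--     # canonical key: multiset of per-suit group-index signatures
--     sig = {}
--     pos = 0
--     for gi, size in enumerate(partition):
--         for i in range(size):
--             sig.setdefault(arr[pos + i], []).append(gi)
--         pos += size
--     return tuple(tuple(v) for v in sorted(sig.values()))
--
-- def suit_arrangement(partition):
--     results = [()]
--     for count in partition:
--         results = [r + g for r in results
--                    for g in itertools.combinations(suits, count)]
--     seen = set()
--     out = []
--     for r in results:
--         k = _sig_key(r, partition)
--         if k not in seen:
--             seen.add(k)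
--             out.append(r)
--     return out
-- ===== Notes on version B (the rewrite author's own statement) =====
-- stated objective: alternative
-- what changed: B builds the candidate list directly as a lexicographically-sorted product of per-group suit combinations (no permutations, no set+sort dedup) and removes isomorphic arrangements by computing each arrangement's canonical signature key once and checking it against a seen-set, instead of A's pairwise is_isomorphic scan that recomputes both signatures for every pair.
-- intended difference: On the empty partition A returns [] (an accident of its index==0 initialisation) while B returns [()], the single empty arrangement — the standard empty-product convention and the intended answer for a partition of zero ranks. — e.g. on suit_arrangement([]): A returns [], B returns [[]]
import Mathlib
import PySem

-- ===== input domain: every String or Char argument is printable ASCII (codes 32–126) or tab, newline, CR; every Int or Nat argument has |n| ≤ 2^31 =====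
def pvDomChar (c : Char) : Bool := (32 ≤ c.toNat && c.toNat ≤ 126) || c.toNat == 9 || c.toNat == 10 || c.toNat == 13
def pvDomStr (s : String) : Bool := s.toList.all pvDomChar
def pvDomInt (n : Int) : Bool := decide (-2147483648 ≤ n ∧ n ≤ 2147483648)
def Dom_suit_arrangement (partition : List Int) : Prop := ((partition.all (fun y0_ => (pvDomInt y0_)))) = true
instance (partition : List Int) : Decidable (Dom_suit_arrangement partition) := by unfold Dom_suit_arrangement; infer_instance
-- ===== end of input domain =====

-- B replaces A's permutations+set+sort generation by a directly-sorted product of per-group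
-- suit combinations and its quadratic pairwise is_isomorphic filter by a computed-once canonical
-- signature key checked against a seen-set (objective: alternative).

-- ===== PORT A =====
def pvSuits : List String := ["c", "d", "h", "s"]

-- inner loop of is_isomorphic: 'for i in range(group_size)', updating both signature dicts
def pvIsoInner (arr1 arr2 : List String) (pos gi : Int)
    (st : PySem.Dict String (List Int) × PySem.Dict String (List Int)) (idxs : List Int) :
    PySem.Dict String (List Int) × PySem.Dict String (List Int) :=
  idxs.foldl (fun st i =>
    let suit1 := PySem.List.pyGetD arr1 (pos + i) ""   -- arr[pos+i]; exact: in range at every call site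
    let suit2 := PySem.List.pyGetD arr2 (pos + i) ""
    let d1 := if st.1.contains suit1 then st.1 else st.1.insert suit1 []  -- if suit1 not in signature1: …
    let d2 := if st.2.contains suit2 then st.2 else st.2.insert suit2 []
    (d1.modify suit1 [] (fun v => v ++ [gi]), d2.modify suit2 [] (fun v => v ++ [gi]))) st

-- outer loop of is_isomorphic: 'for group_idx, group_size in enumerate(rank_pattern)'
def pvIsoLoop (arr1 arr2 : List String) (l : List (Int × Int))
    (st : Int × PySem.Dict String (List Int) × PySem.Dict String (List Int)) :
    Int × PySem.Dict String (List Int) × PySem.Dict String (List Int) :=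
  l.foldl (fun st p =>
    let ds := pvIsoInner arr1 arr2 st.1 p.1 st.2 (PySem.List.pyRange 0 p.2)
    (st.1 + p.2, ds)) st

def pvIsIsomorphic (sa1 sa2 : List String) (rank_pattern : List Int) : Bool :=
  if sa1.length ≠ sa2.length then false
  else
    let st := pvIsoLoop sa1 sa2 (PySem.List.enumerate rank_pattern 0)
      (0, PySem.Dict.empty, PySem.Dict.empty)
    decide (PySem.List.sorted st.2.1.values (fun v => v) false
          = PySem.List.sorted st.2.2.values (fun v => v) false)

def suit_arrangement (partition : List Int) : List (List String) :=
  let sc := (PySem.List.pyRange 0 (partition.length : Int)).foldl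
    (fun sc idx =>
      let count := PySem.List.pyGetD partition idx 0   -- partition[index]; exact: idx ∈ range(len(partition))
      -- itertools.permutations(suits, count) raises ValueError for count < 0 — excluded by Pre_
      if idx == 0 then
        (PySem.List.permutations pvSuits count.toNat).foldl
          (fun acc c => acc ++ [PySem.List.sorted c (fun x => x) false]) sc
      else
        sc.foldl (fun acc r =>
          (PySem.List.permutations pvSuits count.toNat).foldl
            (fun acc2 c => acc2 ++ [r ++ PySem.List.sorted c (fun x => x) false]) acc) []) []
  let results := PySem.List.sorted (PySem.Set.ofList sc) (fun x => x) false
  results.foldl (fun uniq r =>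
    if uniq.any (fun u => pvIsIsomorphic r u partition) then uniq else uniq ++ [r]) []

-- ===== PORT B =====
-- inner loop of _sig_key: 'sig.setdefault(arr[pos+i], []).append(gi)'
def pvSigInner (arr : List String) (pos gi : Int) (d : PySem.Dict String (List Int))
    (idxs : List Int) : PySem.Dict String (List Int) :=
  idxs.foldl (fun d i =>
    let s := PySem.List.pyGetD arr (pos + i) ""   -- arr[pos+i]; exact: in range at every call site
    (d.setdefault s []).modify s [] (fun v => v ++ [gi])) d

def pvSigLoop (arr : List String) (l : List (Int × Int)) (st : Int × PySem.Dict String (List Int)) :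
    Int × PySem.Dict String (List Int) :=
  l.foldl (fun st p => (st.1 + p.2, pvSigInner arr st.1 p.1 st.2 (PySem.List.pyRange 0 p.2))) st

def pvSigKey (arr : List String) (partition : List Int) : List (List Int) :=
  let st := pvSigLoop arr (PySem.List.enumerate partition 0) (0, PySem.Dict.empty)
  PySem.List.sorted st.2.values (fun v => v) false

def suit_arrangement_alt (partition : List Int) : List (List String) :=
  let results := partition.foldl
    (fun rs c => rs.flatMap (fun r => (PySem.List.combinations pvSuits c.toNat).map (fun g => r ++ g)))
    [[]]
  (results.foldl
    (fun (st : PySem.Set (List (List Int)) × List (List String)) r =>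
      let k := pvSigKey r partition
      if PySem.Set.contains st.1 k then st else (PySem.Set.add st.1 k, st.2 ++ [r]))
    ((PySem.Set.empty : PySem.Set (List (List Int))), ([] : List (List String)))).2

-- ===== PRECONDITION & SPEC =====
-- Pre_ excludes exactly the partitions on which A raises ValueError: a negative count whose
-- predecessors all lie in 0..4 (so the arrangement list is still nonempty and
-- itertools.permutations(suits, count) with count < 0 is actually evaluated).
def Pre_suit_arrangement (partition : List Int) : Prop :=
  ∀ i < partition.length, partition.getD i 0 < 0 →
    ∃ j < i, (partition.getD j 0 < 0 ∨ 4 < partition.getD j 0)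
instance (partition : List Int) : Decidable (Pre_suit_arrangement partition) := by
  unfold Pre_suit_arrangement; infer_instance
def pvWitness_suit_arrangement : List Int := [2, 1]

-- On the empty partition A returns [] (an accident of its index==0 initialisation) while B returns
-- [()], the single empty arrangement — the standard empty-product convention and the intended answer.
def D_suit_arrangement (partition : List Int) : Prop := partition = []
instance (partition : List Int) : Decidable (D_suit_arrangement partition) := by
  unfold D_suit_arrangement; infer_instance

def Spec_suit_arrangement (partition : List Int) (out : List (List String)) : Prop :=
  ¬ D_suit_arrangement partition → out = suit_arrangement_alt partition
instance (partition : List Int) (out : List (List String)) : Decidable (Spec_suit_arrangement partition out) := by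
  unfold Spec_suit_arrangement; infer_instance

def pvDiffWitness_suit_arrangement : List Int := []
def pvDiffWitnessOut_suit_arrangement : (List (List String)) × (List (List String)) := ([], [[]])

-- ===== CLAIM (what is proved, stated in full; the proofs are below) =====
def Claim_unchanged_suit_arrangement : Prop := ∀ (partition : List Int),
  Dom_suit_arrangement partition → Pre_suit_arrangement partition →
  Spec_suit_arrangement partition (suit_arrangement partition)
def Claim_changed_suit_arrangement : Prop :=
  Dom_suit_arrangement (pvDiffWitness_suit_arrangement) ∧
  Pre_suit_arrangement (pvDiffWitness_suit_arrangement) ∧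
  D_suit_arrangement (pvDiffWitness_suit_arrangement) ∧
  suit_arrangement (pvDiffWitness_suit_arrangement) = pvDiffWitnessOut_suit_arrangement.1 ∧
  suit_arrangement_alt (pvDiffWitness_suit_arrangement) = pvDiffWitnessOut_suit_arrangement.2 ∧
  pvDiffWitnessOut_suit_arrangement.1 ≠ pvDiffWitnessOut_suit_arrangement.2
def Claim_exact_suit_arrangement : Prop := ∀ (partition : List Int),
  Dom_suit_arrangement partition → Pre_suit_arrangement partition →
  D_suit_arrangement partition → suit_arrangement partition ≠ suit_arrangement_alt partition

-- ===== LEMMAS AND PROOFS =====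

-- ---- generic order bridges ----
lemma pvLtIffLex {α : Type} [LT α] (l1 l2 : List α) :
    l1 < l2 ↔ List.Lex (fun a b : α => a < b) l1 l2 := List.lt_iff_lex_lt l1 l2

lemma pvSortedInstCongr {α κ : Type} (i1 i2 : LT κ) (d1 : @DecidableLT κ i1) (d2 : @DecidableLT κ i2)
    (h : i1 = i2) (xs : List α) (key : α → κ) (rev : Bool) :
    @PySem.List.sorted α κ i1 d1 xs key rev = @PySem.List.sorted α κ i2 d2 xs key rev := by
  subst h; congr 1

lemma pvConsLtCons {α : Type} [LT α] (x : α) {a b : List α} (h : a < b) : x :: a < x :: b := by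
  rw [pvLtIffLex] at h ⊢; exact List.Lex.cons h

lemma pvHeadLtHead {α : Type} [LT α] {x y : α} (h : x < y) (a b : List α) : x :: a < y :: b := by
  rw [pvLtIffLex]; exact List.Lex.rel h

lemma pvLtAppendLeft {α : Type} [LT α] (r : List α) {a b : List α} (h : a < b) : r ++ a < r ++ b := by
  induction r with
  | nil => simpa using h
  | cons x r ih => simpa using pvConsLtCons x ih

lemma pvLtAppendOfLenEq {α : Type} [LT α] {r1 r2 : List α} (hlen : r1.length = r2.length)
    (h : r1 < r2) (a b : List α) : r1 ++ a < r2 ++ b := by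
  rw [pvLtIffLex] at h
  induction h with
  | nil => simp at hlen
  | @rel x y l1 l2 hxy => exact pvHeadLtHead hxy _ _
  | @cons x l1 l2 h ih =>
      simp only [List.length_cons, Nat.succ.injEq] at hlen
      simpa using pvConsLtCons x (ih hlen)

-- ---- permutations / combinations membership ----
lemma pvPermutationsSucc {α : Type} (xs : List α) (r : Nat) :
    PySem.List.permutations xs (r+1) = (List.range xs.length).flatMap (fun i =>
      match xs[i]? with
      | none => []
      | some x => (PySem.List.permutations (xs.eraseIdx i) r).map (fun p => x :: p)) := by
  simp [PySem.List.permutations]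
  rfl

lemma pvMemPermutations {α : Type} [DecidableEq α] :
    ∀ (r : Nat) (xs : List α), xs.Nodup → ∀ (p : List α),
      p ∈ PySem.List.permutations xs r ↔ p.Nodup ∧ p ⊆ xs ∧ p.length = r := by
  intro r
  induction r with
  | zero =>
      intro xs _ p
      have h0 : PySem.List.permutations xs 0 = [[]] := rfl
      rw [h0]
      simp only [List.mem_singleton]
      constructor
      · rintro rfl; simp
      · rintro ⟨_, _, h⟩; exact List.length_eq_zero_iff.mp h
  | succ r ih =>
      intro xs hnd p
      rw [pvPermutationsSucc, List.mem_flatMap]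
      constructor
      · rintro ⟨i, hir, hp⟩
        have hi : i < xs.length := List.mem_range.mp hir
        rw [List.getElem?_eq_getElem hi] at hp
        simp only [List.mem_map] at hp
        obtain ⟨q, hq, rfl⟩ := hp
        have hnd' : (xs.eraseIdx i).Nodup := (List.eraseIdx_sublist xs i).nodup hnd
        obtain ⟨hqnd, hqsub, hqlen⟩ := (ih (xs.eraseIdx i) hnd' q).1 hq
        refine ⟨List.nodup_cons.mpr ⟨?_, hqnd⟩, ?_, by simp [hqlen]⟩
        · intro hmem
          have h2 := hqsub hmem
          rw [← hnd.erase_getElem i hi] at h2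
          exact ((List.Nodup.mem_erase_iff hnd).mp h2).1 rfl
        · exact List.cons_subset.mpr ⟨List.getElem_mem hi,
            fun c hc => (List.eraseIdx_sublist xs i).subset (hqsub hc)⟩
      · rintro ⟨hpnd, hpsub, hplen⟩
        match p with
        | [] => simp at hplen
        | a :: q =>
          have ha : a ∈ xs := hpsub List.mem_cons_self
          obtain ⟨i, hi, hgi⟩ := List.getElem_of_mem ha
          refine ⟨i, List.mem_range.mpr hi, ?_⟩
          rw [List.getElem?_eq_getElem hi, hgi]
          simp only [List.mem_map]
          refine ⟨q, ?_, rfl⟩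
          have hnd' : (xs.eraseIdx i).Nodup := (List.eraseIdx_sublist xs i).nodup hnd
          rw [List.nodup_cons] at hpnd
          refine (ih (xs.eraseIdx i) hnd' q).2 ⟨hpnd.2, ?_, by simpa using hplen⟩
          intro c hc
          rw [← hnd.erase_getElem i hi, hgi]
          refine (List.Nodup.mem_erase_iff hnd).mpr ⟨?_, hpsub (List.mem_cons_of_mem _ hc)⟩
          rintro rfl
          exact hpnd.1 hc

-- a Pairwise-< list that is a subset of a Pairwise-< list is a sublist of it
lemma pvSublistOfSubsetPairwise {α : Type} [Preorder α] :
    ∀ (s x : List α), s.Pairwise (· < ·) → x.Pairwise (· < ·) → x ⊆ s → x.Sublist s := by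
  intro s
  induction s with
  | nil => intro x _ _ hsub; rw [List.subset_nil.mp hsub]
  | cons b s' ih =>
      intro x hsp hxp hsub
      match x with
      | [] => exact List.nil_sublist _
      | a :: x' =>
        rw [List.pairwise_cons] at hxp hsp
        by_cases hab : a = b
        · subst hab
          refine List.Sublist.cons₂ a (ih x' hsp.2 hxp.2 ?_)
          intro c hc
          rcases List.mem_cons.mp (hsub (List.mem_cons_of_mem _ hc)) with h | h
          · exact absurd h.symm (ne_of_lt (hxp.1 c hc))
          · exact h
        · have ha : a ∈ s' := by
            rcases List.mem_cons.mp (hsub List.mem_cons_self) with h | h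
            · exact absurd h hab
            · exact h
          refine List.Sublist.cons b (ih (a :: x') hsp.2 (List.pairwise_cons.mpr hxp) ?_)
          intro c hc
          rcases List.mem_cons.mp hc with rfl | hc'
          · exact ha
          · rcases List.mem_cons.mp (hsub (List.mem_cons_of_mem _ hc')) with h | h
            · exact absurd h.symm (ne_of_lt (lt_trans (hsp.1 a ha) (hxp.1 c hc')))
            · exact h

def pvGA (c : Int) : List (List String) :=
  (PySem.List.permutations pvSuits c.toNat).map (fun p => PySem.List.sorted p (fun x => x) false)

def pvGB (c : Int) : List (List String) := PySem.List.combinations pvSuits c.toNat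

lemma pvSuitsPairwise : pvSuits.Pairwise (· < ·) := by
  have h : (pvSuits.map String.toList).Pairwise (· < ·) := by decide
  rw [List.pairwise_map] at h
  exact h.imp (fun hab => String.lt_iff_toList_lt.2 hab)

lemma pvSuitsNodup : pvSuits.Nodup := by decide

lemma pvMemGAIffGB (c : Int) (x : List String) : x ∈ pvGA c ↔ x ∈ pvGB c := by
  unfold pvGA pvGB
  rw [PySem.List.mem_combinations_iff]
  constructor
  · rw [List.mem_map]
    rintro ⟨p, hp, rfl⟩
    obtain ⟨hnd, hsub, hlen⟩ := (pvMemPermutations c.toNat pvSuits pvSuitsNodup p).1 hp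
    have hperm : (PySem.List.sorted p (fun x => x) false).Perm p :=
      PySem.List.sorted_perm p (fun x => x) false
    have hple : (PySem.List.sorted p (fun x => x) false).Pairwise (fun a b => a ≤ b) := by
      rw [pvSortedInstCongr _ _ _ LinearOrder.toDecidableLT rfl]
      exact PySem.List.sorted_pairwise p (fun x => x)
    have hnd' : (PySem.List.sorted p (fun x => x) false).Nodup := hperm.nodup_iff.mpr hnd
    have hplt : (PySem.List.sorted p (fun x => x) false).Pairwise (· < ·) :=
      (hple.and hnd').imp (fun h => lt_of_le_of_ne h.1 h.2)
    refine ⟨pvSublistOfSubsetPairwise pvSuits _ pvSuitsPairwise hplt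
      (fun y hy => hsub (hperm.subset hy)), by rw [hperm.length_eq, hlen]⟩
  · rintro ⟨hsubl, hlen⟩
    have hplt : x.Pairwise (· < ·) := List.Pairwise.sublist hsubl pvSuitsPairwise
    have hnd : x.Nodup := hplt.imp (fun h => ne_of_lt h)
    rw [List.mem_map]
    refine ⟨x, (pvMemPermutations c.toNat pvSuits pvSuitsNodup x).2 ⟨hnd, hsubl.subset, hlen⟩, ?_⟩
    rw [pvSortedInstCongr _ _ _ LinearOrder.toDecidableLT rfl]
    exact PySem.List.sorted_eq_self_of_pairwise x (fun x => x) (hplt.imp (fun h => le_of_lt h))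

lemma pvCombinationsPairwise {α : Type} [LinearOrder α] :
    ∀ (xs : List α), xs.Pairwise (· < ·) → ∀ (r : Nat),
      (PySem.List.combinations xs r).Pairwise (· < ·) := by
  intro xs
  induction xs with
  | nil =>
      intro _ r
      match r with
      | 0 => rw [PySem.List.combinations_zero]; simp
      | r + 1 => rw [PySem.List.combinations_nil_succ]; simp
  | cons x xs ih =>
      intro hp r
      rw [List.pairwise_cons] at hp
      match r with
      | 0 => rw [PySem.List.combinations_zero]; simp
      | r + 1 =>
        rw [PySem.List.combinations_cons_succ]
        refine List.pairwise_append.mpr ⟨?_, ih hp.2 (r+1), ?_⟩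
        · exact List.pairwise_map.mpr ((ih hp.2 r).imp (fun h => pvConsLtCons x h))
        · intro a hamem b hb
          rw [List.mem_map] at hamem
          obtain ⟨c, _, rfl⟩ := hamem
          match b, PySem.List.length_of_mem_combinations hb with
          | y :: b', _ =>
            have hy : y ∈ xs := (PySem.List.sublist_of_mem_combinations hb).subset
              List.mem_cons_self
            exact pvHeadLtHead (hp.1 y hy) _ _

lemma pvGBPairwise (c : Int) : (pvGB c).Pairwise (· < ·) :=
  pvCombinationsPairwise pvSuits pvSuitsPairwise c.toNat

lemma pvGBLen (c : Int) : ∀ x ∈ pvGB c, x.length = c.toNat := by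
  intro x hx; exact PySem.List.length_of_mem_combinations hx

-- ---- the product of per-group choices ----
def pvStep (G : List (List String)) (s : List (List String)) : List (List String) :=
  s.flatMap (fun r => G.map (fun g => r ++ g))

lemma pvMemStep (G s : List (List String)) (x : List String) :
    x ∈ pvStep G s ↔ ∃ r ∈ s, ∃ g ∈ G, x = r ++ g := by
  simp [pvStep, eq_comm]

def pvFoldA (rest : List Int) (s : List (List String)) : List (List String) :=
  rest.foldl (fun s c => pvStep (pvGA c) s) s

def pvFoldB (rest : List Int) (s : List (List String)) : List (List String) :=
  rest.foldl (fun s c => pvStep (pvGB c) s) s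

lemma pvFoldMemCongr : ∀ (rest : List Int) (s1 s2 : List (List String)),
    (∀ x, x ∈ s1 ↔ x ∈ s2) → ∀ x, x ∈ pvFoldA rest s1 ↔ x ∈ pvFoldB rest s2 := by
  intro rest
  induction rest with
  | nil => intro s1 s2 h x; exact h x
  | cons c rest' ih =>
      intro s1 s2 h x
      have h' : ∀ y, y ∈ pvStep (pvGA c) s1 ↔ y ∈ pvStep (pvGB c) s2 := by
        intro y
        rw [pvMemStep, pvMemStep]
        constructor
        · rintro ⟨r, hr, g, hg, rfl⟩
          exact ⟨r, (h r).1 hr, g, (pvMemGAIffGB c g).1 hg, rfl⟩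
        · rintro ⟨r, hr, g, hg, rfl⟩
          exact ⟨r, (h r).2 hr, g, (pvMemGAIffGB c g).2 hg, rfl⟩
      exact ih _ _ h' x

lemma pvStepLen {G : List (List String)} {L n : Nat} (hGl : ∀ g ∈ G, g.length = n) :
    ∀ {s : List (List String)}, (∀ x ∈ s, x.length = L) →
      ∀ x ∈ pvStep G s, x.length = L + n := by
  intro s hsl x hx
  rw [pvMemStep] at hx
  obtain ⟨r, hr, g, hg, rfl⟩ := hx
  simp [hsl r hr, hGl g hg]

lemma pvStepPairwise {G : List (List String)} {L : Nat}
    (hGp : G.Pairwise (· < ·)) :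
    ∀ (s : List (List String)), s.Pairwise (· < ·) → (∀ x ∈ s, x.length = L) →
      (pvStep G s).Pairwise (· < ·) := by
  intro s
  induction s with
  | nil => intro _ _; simp [pvStep]
  | cons r s' ih =>
      intro hsp hsl
      rw [List.pairwise_cons] at hsp
      simp only [pvStep, List.flatMap_cons]
      refine List.pairwise_append.mpr ⟨?_, ?_, ?_⟩
      · exact List.pairwise_map.mpr (hGp.imp (fun h => pvLtAppendLeft r h))
      · exact ih hsp.2 (fun x hx => hsl x (List.mem_cons_of_mem _ hx))
      · intro x hx y hy
        rw [List.mem_map] at hx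
        obtain ⟨g, hg, rfl⟩ := hx
        rw [show (s'.flatMap fun r => G.map (fun g => r ++ g)) = pvStep G s' from rfl,
          pvMemStep] at hy
        obtain ⟨r2, hr2, g2, hg2, rfl⟩ := hy
        refine pvLtAppendOfLenEq ?_ (hsp.1 r2 hr2) g g2
        rw [hsl r (List.mem_cons_self), hsl r2 (List.mem_cons_of_mem _ hr2)]

lemma pvFoldPairwiseLen : ∀ (rest : List Int) (s : List (List String)) (L : Nat),
    s.Pairwise (· < ·) → (∀ x ∈ s, x.length = L) →
    (pvFoldB rest s).Pairwise (· < ·) ∧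
      ∀ x ∈ pvFoldB rest s, x.length = L + (rest.map Int.toNat).sum := by
  intro rest
  induction rest with
  | nil => intro s L hp hl; simpa [pvFoldB] using ⟨hp, hl⟩
  | cons c rest' ih =>
      intro s L hp hl
      have hstep : pvFoldB (c :: rest') s = pvFoldB rest' (pvStep (pvGB c) s) := rfl
      rw [hstep]
      have h1 := pvStepPairwise (pvGBPairwise c) s hp hl
      have h2 := pvStepLen (pvGBLen c) hl
      obtain ⟨hA, hB⟩ := ih (pvStep (pvGB c) s) (L + c.toNat) h1 h2
      refine ⟨hA, fun x hx => ?_⟩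
      rw [hB x hx]
      simp [List.map_cons, List.sum_cons]
      omega

-- ---- A's generation loop in fold form ----
lemma pvAGenShift (partition : List Int) : ∀ (rest pre : List Int), partition = pre ++ rest →
    pre ≠ [] → ∀ (s : List (List String)),
    (PySem.List.pyRange (pre.length : Int) ((partition.length : Nat) : Int)).foldl
      (fun sc idx =>
        if idx == 0 then
          (PySem.List.permutations pvSuits (PySem.List.pyGetD partition idx 0).toNat).foldl
            (fun acc c => acc ++ [PySem.List.sorted c (fun x => x) false]) sc
        else
          sc.foldl (fun acc r =>
            (PySem.List.permutations pvSuits (PySem.List.pyGetD partition idx 0).toNat).foldl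
              (fun acc2 c => acc2 ++ [r ++ PySem.List.sorted c (fun x => x) false]) acc) []) s
      = pvFoldA rest s := by
  intro rest
  induction rest with
  | nil =>
      intro pre hpart _ s
      have hlen : (pre.length : Int) = (partition.length : Nat) := by
        subst hpart; simp
      rw [hlen, show PySem.List.pyRange ((partition.length : Nat) : Int)
        ((partition.length : Nat) : Int) = [] from by simp [PySem.List.pyRange]]
      rfl
  | cons cc rest' ih =>
      intro pre hpart hne s
      have hlt : (pre.length : Int) < ((partition.length : Nat) : Int) := by
        subst hpart; rw [List.length_append, List.length_cons]; push_cast; omega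
      rw [PySem.List.pyRange_one_cons hlt, List.foldl_cons]
      have hidx : ((pre.length : Int) == 0) = false := by
        simp only [beq_eq_false_iff_ne, ne_eq, Nat.cast_eq_zero, List.length_eq_zero_iff]
        exact hne
      have hcnt : PySem.List.pyGetD partition (pre.length : Int) 0 = cc := by
        subst hpart
        rw [PySem.List.pyGetD_natCast]
        simp [List.getD]
      simp only [hidx, hcnt, Bool.false_eq_true, if_false]
      have hbody : (s.foldl (fun acc r =>
          (PySem.List.permutations pvSuits cc.toNat).foldl
            (fun acc2 c => acc2 ++ [r ++ PySem.List.sorted c (fun x => x) false]) acc) [])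
          = pvStep (pvGA cc) s := by
        simp only [PySem.List.foldl_append_singleton_eq_map]
        rw [show (fun (acc : List (List String)) r => acc ++
            (PySem.List.permutations pvSuits cc.toNat).map
              (fun c => r ++ PySem.List.sorted c (fun x => x) false))
          = (fun acc r => acc ++ (pvGA cc).map (fun g => r ++ g)) from by
            funext acc r; rw [pvGA, List.map_map]; rfl]
        rw [PySem.List.foldl_append_eq_flatMap]
        rfl
      rw [hbody]
      have hlen1 : (pre.length : Int) + 1 = ((pre ++ [cc]).length : Nat) := by simp
      rw [hlen1]
      exact ih (pre ++ [cc]) (by rw [hpart]; simp) (by simp) (pvStep (pvGA cc) s)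

-- ---- signatures ----
lemma pvSetdefaultEq (d : PySem.Dict String (List Int)) (s : String) :
    (if d.contains s then d else d.insert s []) = d.setdefault s [] := by
  by_cases h : d.contains s
  · simp only [h, if_true]
    exact (PySem.Dict.setdefault_of_contains d [] h).symm
  · simp only [Bool.not_eq_true] at h
    simp only [h, Bool.false_eq_true, if_false]
    exact (PySem.Dict.setdefault_of_not_contains d [] h).symm

lemma pvIsoInnerSplit (arr1 arr2 : List String) (pos gi : Int) :
    ∀ (idxs : List Int) (st : PySem.Dict String (List Int) × PySem.Dict String (List Int)),
      pvIsoInner arr1 arr2 pos gi st idxs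
        = (pvSigInner arr1 pos gi st.1 idxs, pvSigInner arr2 pos gi st.2 idxs) := by
  intro idxs
  induction idxs with
  | nil => intro st; rfl
  | cons i idxs ih =>
      intro st
      simp only [pvIsoInner, pvSigInner, List.foldl_cons] at *
      rw [ih]
      simp only [pvSetdefaultEq]

lemma pvIsoLoopSplit (arr1 arr2 : List String) :
    ∀ (l : List (Int × Int)) (pos : Int) (d1 d2 : PySem.Dict String (List Int)),
      pvIsoLoop arr1 arr2 l (pos, d1, d2)
        = ((pvSigLoop arr1 l (pos, d1)).1, (pvSigLoop arr1 l (pos, d1)).2,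
           (pvSigLoop arr2 l (pos, d2)).2) := by
  intro l
  induction l with
  | nil => intros; rfl
  | cons p l ih =>
      intro pos d1 d2
      simp only [pvIsoLoop, pvSigLoop, List.foldl_cons] at *
      rw [pvIsoInnerSplit]
      exact ih (pos + p.2) _ _

lemma pvIsoEqKey (x y : List String) (partition : List Int) (h : x.length = y.length) :
    pvIsIsomorphic x y partition = decide (pvSigKey x partition = pvSigKey y partition) := by
  unfold pvIsIsomorphic pvSigKey
  rw [if_neg (by simp [h])]
  rw [pvIsoLoopSplit]

-- ---- the dedup loops ----
lemma pvFilterEquiv (partition : List Int) (L : Nat) :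
    ∀ (l uniq : List (List String)), (∀ x ∈ l, x.length = L) → (∀ u ∈ uniq, u.length = L) →
      l.foldl (fun (st : PySem.Set (List (List Int)) × List (List String)) r =>
          if PySem.Set.contains st.1 (pvSigKey r partition) then st
          else (PySem.Set.add st.1 (pvSigKey r partition), st.2 ++ [r]))
        (uniq.map (fun u => pvSigKey u partition), uniq)
      = ((l.foldl (fun uniq r =>
            if uniq.any (fun u => pvIsIsomorphic r u partition) then uniq else uniq ++ [r]) uniq).map
          (fun u => pvSigKey u partition),
         l.foldl (fun uniq r =>
            if uniq.any (fun u => pvIsIsomorphic r u partition) then uniq else uniq ++ [r]) uniq) := by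
  intro l
  induction l with
  | nil => intro uniq _ _; rfl
  | cons r l ih =>
      intro uniq hl hu
      have hr : r.length = L := hl r List.mem_cons_self
      have hcong : (uniq.any (fun u => pvIsIsomorphic r u partition))
          = uniq.any (fun u => decide (pvSigKey r partition = pvSigKey u partition)) := by
        refine PySem.List.any_congr_mem (fun u hu' => ?_)
        exact pvIsoEqKey r u partition (by rw [hr, hu u hu'])
      have hcond : (uniq.any (fun u => decide (pvSigKey r partition = pvSigKey u partition)))
          = PySem.Set.contains (uniq.map (fun u => pvSigKey u partition)) (pvSigKey r partition) := by
        rw [Bool.eq_iff_iff]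
        simp only [List.any_eq_true, decide_eq_true_eq,
          PySem.Set.contains_eq_listContains, List.contains_iff_exists_mem_beq, List.mem_map,
          beq_iff_eq]
        constructor
        · rintro ⟨u, hu', hk⟩; exact ⟨_, ⟨u, hu', rfl⟩, hk⟩
        · rintro ⟨_, ⟨u, hu', rfl⟩, hk⟩; exact ⟨u, hu', hk⟩
      simp only [List.foldl_cons, hcong, hcond]
      by_cases hc : PySem.Set.contains (uniq.map (fun u => pvSigKey u partition))
          (pvSigKey r partition) = true
      · simp only [hc, if_true]
        exact ih uniq (fun x hx => hl x (List.mem_cons_of_mem _ hx)) hu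
      · rw [Bool.not_eq_true] at hc
        simp only [hc, Bool.false_eq_true, if_false]
        have hadd : PySem.Set.add (uniq.map (fun u => pvSigKey u partition)) (pvSigKey r partition)
            = (uniq ++ [r]).map (fun u => pvSigKey u partition) := by
          unfold PySem.Set.add
          rw [hc]
          simp
        rw [hadd]
        refine ih (uniq ++ [r]) (fun x hx => hl x (List.mem_cons_of_mem _ hx)) ?_
        intro u hu'
        rcases List.mem_append.mp hu' with h | h
        · exact hu u h
        · rw [List.mem_singleton.mp h]; exact hr

-- ---- assembly ----
lemma pvMain (c : Int) (rest : List Int) :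
    suit_arrangement (c :: rest) = suit_arrangement_alt (c :: rest) := by
  simp only [suit_arrangement, suit_arrangement_alt]
  have h0 : (0:Int) < (((c :: rest).length : Nat) : Int) := by
    rw [List.length_cons]; push_cast; omega
  rw [PySem.List.pyRange_one_cons h0, List.foldl_cons]
  have hcnt0 : PySem.List.pyGetD (c :: rest) (0:Int) 0 = c := by
    rw [show ((0:Int)) = ((0:Nat):Int) from rfl, PySem.List.pyGetD_natCast]; rfl
  simp only [show ((0:Int) == 0) = true from rfl, if_true, hcnt0]
  rw [PySem.List.foldl_append_singleton_eq_map]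
  rw [show ((0:Int) + 1) = ((([c] : List Int).length : Nat) : Int) from rfl]
  rw [pvAGenShift (c :: rest) rest [c] rfl (by simp) _]
  rw [show ([] : List (List String)) ++
      (PySem.List.permutations pvSuits c.toNat).map (fun x => PySem.List.sorted x (fun x => x) false)
      = pvGA c from by rw [List.nil_append]; rfl]
  -- B's generation
  rw [List.foldl_cons]
  rw [show (([([] : List String)]).flatMap
      (fun r => (PySem.List.combinations pvSuits c.toNat).map (fun g => r ++ g)))
      = pvGB c from by simp [pvGB]]
  rw [show (rest.foldl (fun rs cc =>
      rs.flatMap (fun r => (PySem.List.combinations pvSuits cc.toNat).map (fun g => r ++ g)))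
      (pvGB c)) = pvFoldB rest (pvGB c) from rfl]
  -- sorted set-of-A-generation is B's product
  have hmem := pvFoldMemCongr rest (pvGA c) (pvGB c) (fun x => pvMemGAIffGB c x)
  obtain ⟨hpw, hlen⟩ := pvFoldPairwiseLen rest (pvGB c) c.toNat (pvGBPairwise c) (pvGBLen c)
  have hnodB : (pvFoldB rest (pvGB c)).Nodup := hpw.imp (fun h => ne_of_lt h)
  have hperm : (pvFoldB rest (pvGB c)).Perm (PySem.Set.ofList (pvFoldA rest (pvGA c))) :=
    (List.perm_ext_iff_of_nodup hnodB (PySem.Set.nodup_ofList _)).mpr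
      (fun a => by rw [PySem.Set.mem_ofList]; exact (hmem a).symm)
  have hsorted : PySem.List.sorted (PySem.Set.ofList (pvFoldA rest (pvGA c))) (fun x => x) false
      = pvFoldB rest (pvGB c) := by
    rw [pvSortedInstCongr _ _ _ LinearOrder.toDecidableLT rfl]
    exact PySem.List.sorted_eq_of_perm_of_pairwise_lt _ _ _ hperm hpw
  rw [hsorted]
  -- the two dedup loops
  have hfe := pvFilterEquiv (c :: rest) (c.toNat + (rest.map Int.toNat).sum)
    (pvFoldB rest (pvGB c)) [] hlen (by simp)
  exact (congrArg Prod.snd hfe).symm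

-- ===== VERDICT =====
theorem suit_arrangement_spec : Claim_unchanged_suit_arrangement := by
  intro partition _ _ hnd
  match partition with
  | [] => exact absurd rfl hnd
  | c :: rest => exact pvMain c rest

theorem suit_arrangement_changed : Claim_changed_suit_arrangement := by
  unfold Claim_changed_suit_arrangement; decide

theorem suit_arrangement_tight : Claim_exact_suit_arrangement := by
  intro partition _ _ hd
  subst hd
  decide
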